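-- pv_equiv track=rewrite | github.com/Parya1112009/python | sum_of_integer_1.py | sum_num
-- ===== SOURCE A (Python) =====
-- def sum_num(num):
--     sum = 0
--     nu = str(num)
--     for n in nu:
--         if int(n) <= 0:
--             return None
--         else:
--             sum += int(n)
--     return sum
-- ===== SOURCE B (Python) =====
-- def sum_num(num):
--     # Arithmetic digit extraction via divmod: no string conversion at all.
--     if num <= 0:
--         return None
--     total = 0
--     n = num
--     while n:
--         n, d = divmod(n, 10)
--         if d == 0:
--             return None
--         total += d
--     return total
-- ===== Notes on version B (the rewrite author's own statement) =====
-- stated objective: alternative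
-- what changed: A stringifies the number and sums int(c) over its characters with an early return; B never builds a string: it extracts digits arithmetically least-significant-first with divmod, returning None when a zero digit appears.
import Mathlib
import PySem

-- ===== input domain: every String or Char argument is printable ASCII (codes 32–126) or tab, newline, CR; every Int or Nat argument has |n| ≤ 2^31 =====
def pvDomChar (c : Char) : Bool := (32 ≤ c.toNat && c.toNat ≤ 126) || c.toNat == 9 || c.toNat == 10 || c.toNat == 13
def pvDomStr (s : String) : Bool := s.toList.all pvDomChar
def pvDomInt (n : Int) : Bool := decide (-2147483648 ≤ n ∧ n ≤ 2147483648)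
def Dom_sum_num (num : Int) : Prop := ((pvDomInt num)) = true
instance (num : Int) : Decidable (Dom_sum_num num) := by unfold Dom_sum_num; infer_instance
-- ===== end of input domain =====

-- B replaces A's string-of-digits loop by pure integer arithmetic: digits are extracted
-- least-significant-first with divmod, no string conversion at all (alternative algorithm, same cost).

-- ===== PORT A =====
-- int(n) on a single character, as Python's int()
def pyIntChar (c : Char) : Option Int := PySem.Int.ofStr? (String.ofList [c])

-- the for-loop with early return, carrying the accumulator 'sum'
def sum_num_go : List Char → Int → Option Int
  | [], s => some s
  | c :: cs, s =>
    match pyIntChar c with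
    | none => none          -- int(n) raises ValueError; excluded by Pre_sum_num
    | some d => if d ≤ 0 then none else sum_num_go cs (s + d)

def sum_num (num : Int) : Option Int :=
  sum_num_go (PySem.Int.toStr num).toList 0

-- ===== PORT B =====
-- the 'while n:' loop; the guard is n ≤ 0 (not n = 0) only to make the recursion total —
-- every reachable n is nonnegative (entry requires num > 0 and floordiv by 10 preserves 0 ≤ n)
def sum_num_alt_go (n total : Int) : Option Int :=
  if _h : n ≤ 0 then some total
  else
    let q := PySem.Int.floordiv n 10
    let d := PySem.Int.mod n 10
    if d = 0 then none else sum_num_alt_go q (total + d)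
  termination_by n.toNat
  decreasing_by
    have h10 : PySem.Int.floordiv n 10 = n / 10 := PySem.Int.floordiv_eq_ediv_of_pos (by omega)
    simp only [h10]
    omega

def sum_num_alt (num : Int) : Option Int :=
  if num ≤ 0 then none else sum_num_alt_go num 0

-- ===== PRECONDITION & SPEC =====
-- Pre_ excludes negative num, on which str(num) starts with '-' and int('-') raises ValueError in A.
def Pre_sum_num (num : Int) : Prop := 0 ≤ num
instance (num : Int) : Decidable (Pre_sum_num num) := by unfold Pre_sum_num; infer_instance
def pvWitness_sum_num : Int := 123

def Spec_sum_num (num : Int) (out : Option Int) : Prop := out = sum_num_alt num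
instance (num : Int) (out : Option Int) : Decidable (Spec_sum_num num out) := by unfold Spec_sum_num; infer_instance

-- ===== CLAIM (what is proved, stated in full; the proofs are below) =====
def Claim_equal_sum_num : Prop := ∀ (num : Int), Dom_sum_num num → Pre_sum_num num → Spec_sum_num num (sum_num num)

-- ===== LEMMAS AND PROOFS =====

-- int(c) of a decimal digit character
theorem pyIntChar_digitChar (d : Nat) (hd : d < 10) :
    pyIntChar (Nat.digitChar d) = some (d : Int) := by
  interval_cases d <;> decide

-- Nat.toDigitsCore: the accumulator is just appended
theorem tdc_acc (f : Nat) : ∀ (n : Nat) (l : List Char),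
    Nat.toDigitsCore 10 f n l = Nat.toDigitsCore 10 f n [] ++ l := by
  induction f with
  | zero => intro n l; simp [Nat.toDigitsCore]
  | succ f ih =>
    intro n l
    simp only [Nat.toDigitsCore]
    by_cases h : n / 10 = 0
    · simp [h]
    · simp only [h, if_false]
      rw [ih (n / 10) (Nat.digitChar (n % 10) :: l), ih (n / 10) [Nat.digitChar (n % 10)]]
      simp

-- Nat.toDigitsCore: any sufficient fuel gives the same result
theorem tdc_fuel (n : Nat) : ∀ (f : Nat), n < f → ∀ (l : List Char),
    Nat.toDigitsCore 10 f n l = Nat.toDigitsCore 10 (n + 1) n l := by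
  induction n using Nat.strong_induction_on with
  | _ n ih =>
    intro f hf l
    obtain ⟨f', rfl⟩ : ∃ f', f = f' + 1 := ⟨f - 1, by omega⟩
    simp only [Nat.toDigitsCore]
    by_cases h : n / 10 = 0
    · simp [h]
    · simp only [h, if_false]
      have hlt : n / 10 < n := Nat.div_lt_self (by omega) (by omega)
      rw [ih (n / 10) hlt f' (by omega), ih (n / 10) hlt n (by omega)]

-- peeling the last decimal digit off Nat.toDigits
theorem toDigits_step (m : Nat) (h : 10 ≤ m) :
    Nat.toDigits 10 m = Nat.toDigits 10 (m / 10) ++ [Nat.digitChar (m % 10)] := by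
  have h0 : ¬ m / 10 = 0 := by omega
  show Nat.toDigitsCore 10 (m + 1) m [] = _
  simp only [Nat.toDigitsCore, h0, if_false]
  rw [tdc_fuel (m / 10) m (by omega) _]
  show _ = Nat.toDigitsCore 10 (m / 10 + 1) (m / 10) [] ++ _
  rw [tdc_acc]

theorem toDigits_lt (m : Nat) (h : m < 10) : Nat.toDigits 10 m = [Nat.digitChar m] := by
  have h0 : m / 10 = 0 := by omega
  show Nat.toDigitsCore 10 (m + 1) m [] = _
  simp [Nat.toDigitsCore, h0, Nat.mod_eq_of_lt h]

-- A's early-return loop over an appended list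
theorem sum_num_go_append (xs ys : List Char) (s : Int) :
    sum_num_go (xs ++ ys) s =
      match sum_num_go xs s with
      | none => none
      | some t => sum_num_go ys t := by
  induction xs generalizing s with
  | nil => simp [sum_num_go]
  | cons c cs ih =>
    simp only [List.cons_append, sum_num_go]
    cases pyIntChar c with
    | none => simp
    | some d =>
      by_cases hd : d ≤ 0 <;> simp [hd, ih]

-- canonical form: None iff some decimal digit is zero, else s + digit sum
def canon (m : Nat) (s : Int) : Option Int :=
  if 0 ∈ Nat.digits 10 m then none else some (s + ((Nat.digits 10 m).sum : Int))

theorem A_char (m : Nat) (hm : 0 < m) : ∀ (s : Int),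
    sum_num_go (Nat.toDigits 10 m) s = canon m s := by
  induction m using Nat.strong_induction_on with
  | _ m ih =>
    intro s
    have hdig : Nat.digits 10 m = m % 10 :: Nat.digits 10 (m / 10) :=
      Nat.digits_def' (by omega) hm
    by_cases hlt : m < 10
    · have h0 : m / 10 = 0 := by omega
      rw [toDigits_lt m hlt]
      simp only [sum_num_go, pyIntChar_digitChar m hlt]
      have : ¬ (m : Int) ≤ 0 := by omega
      simp only [this, if_false, canon, hdig, h0]
      simp [Nat.mod_eq_of_lt hlt]
      omega
    · have h10 : 10 ≤ m := by omega
      have hq : 0 < m / 10 := by omega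
      rw [toDigits_step m h10, sum_num_go_append, ih (m / 10) (Nat.div_lt_self hm (by omega)) hq s]
      simp only [canon, hdig, List.mem_cons, List.sum_cons]
      by_cases hz : 0 ∈ Nat.digits 10 (m / 10)
      · simp [hz]
      · have hmod : m % 10 < 10 := Nat.mod_lt m (by omega)
        simp only [hz, if_false]
        simp only [sum_num_go, pyIntChar_digitChar (m % 10) hmod]
        by_cases h0 : m % 10 = 0
        · simp [h0]
        · have : ¬ ((m % 10 : Nat) : Int) ≤ 0 := by omega
          simp only [this, if_false, or_false]
          rw [if_neg (show ¬(0 = m % 10) by omega)]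
          simp only [Option.some.injEq]
          push_cast
          omega

theorem B_char (m : Nat) (hm : 0 < m) : ∀ (s : Int),
    sum_num_alt_go (m : Int) s = canon m s := by
  induction m using Nat.strong_induction_on with
  | _ m ih =>
    intro s
    have hdig : Nat.digits 10 m = m % 10 :: Nat.digits 10 (m / 10) :=
      Nat.digits_def' (by omega) hm
    have hpos : ¬ (m : Int) ≤ 0 := by omega
    rw [sum_num_alt_go]
    simp only [hpos, dif_neg, not_false_iff]
    have hfl : PySem.Int.floordiv (m : Int) 10 = ((m / 10 : Nat) : Int) := by
      exact_mod_cast PySem.Int.floordiv_natCast m 10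
    have hmd : PySem.Int.mod (m : Int) 10 = ((m % 10 : Nat) : Int) := by
      exact_mod_cast PySem.Int.mod_natCast m 10
    simp only [hfl, hmd]
    by_cases h0 : m % 10 = 0
    · simp [h0, canon, hdig]
    · have hd0 : ¬ ((m % 10 : Nat) : Int) = 0 := by omega
      simp only [hd0, if_false]
      by_cases hq : m / 10 = 0
      · rw [hq]
        rw [sum_num_alt_go]
        simp only [le_refl, dif_pos, Nat.cast_zero]
        simp [canon, hdig, hq]
        omega
      · rw [ih (m / 10) (Nat.div_lt_self hm (by omega)) (by omega) _]
        simp only [canon, hdig, List.mem_cons, List.sum_cons]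
        by_cases hz : 0 ∈ Nat.digits 10 (m / 10)
        · simp [hz]
        · simp only [hz, or_false]
          rw [if_neg (show ¬(0 = m % 10) by omega)]
          push_cast
          simp [add_assoc]

-- ===== VERDICT (by name: the statement is the Claim_ definition above) =====
theorem sum_num_spec : Claim_equal_sum_num := by
  intro num _ hpre
  unfold Spec_sum_num
  by_cases h0 : num = 0
  · subst h0; decide
  · have hpos : 0 < num := lt_of_le_of_ne hpre (Ne.symm h0)
    have hchars : (PySem.Int.toStr num).toList = Nat.toDigits 10 num.toNat := by
      rw [PySem.Int.toList_toStr]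
      simp [PySem.Int.toChars, not_lt.mpr hpre]
    have hcast : ((num.toNat : Nat) : Int) = num := Int.toNat_of_nonneg hpre
    have hnt : 0 < num.toNat := by omega
    unfold sum_num sum_num_alt
    rw [hchars, A_char num.toNat hnt 0, if_neg (not_le.mpr hpos)]
    have hB := B_char num.toNat hnt 0
    rw [hcast] at hB
    exact hB.symm
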